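-- pv_equiv track=rewrite | github.com/tony-andreev94/Python-Fundamentals | 06. Text Processing/07. String Explosion.py | alternative_solution
-- ===== SOURCE A (Python) =====
-- def alternative_solution(text):
--     index = 0
--     power = 0
--     while index < len(text):
--         if text[index] == ">":
--             power += int(text[index + 1])
--
--         elif power > 0:
--             text = text[:index] + text[index + 1:]
--             index -= 1
--             power -= 1
--
--         index += 1
--
--     return text
-- ===== SOURCE B (Python) =====
-- # Chunk-based rewrite: jump between '>' markers with str.find, handle each
-- # marker-free segment at once by slicing off the first `power` chars; O(n).
-- def alternative_solution(text):
--     parts = []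
--     power = 0
--     i = 0
--     n = len(text)
--     while True:
--         j = text.find('>', i)
--         if j == -1:
--             j = n
--         seg = text[i:j]
--         if power < len(seg):
--             parts.append(seg[power:])
--             power = 0
--         else:
--             power -= len(seg)
--         if j == n:
--             break
--         parts.append('>')
--         power += int(text[j + 1])
--         i = j + 1
--     return ''.join(parts)
-- ===== Notes on version B (the rewrite author's own statement) =====
-- stated objective: faster
-- what changed: Replaces the in-place delete-by-slicing while loop (each deletion rebuilds the whole string) with a chunked scan that uses str.find to jump between '>' markers and removes the pending chars of each marker-free segment with one slice, joining the parts once.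
import Mathlib
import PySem

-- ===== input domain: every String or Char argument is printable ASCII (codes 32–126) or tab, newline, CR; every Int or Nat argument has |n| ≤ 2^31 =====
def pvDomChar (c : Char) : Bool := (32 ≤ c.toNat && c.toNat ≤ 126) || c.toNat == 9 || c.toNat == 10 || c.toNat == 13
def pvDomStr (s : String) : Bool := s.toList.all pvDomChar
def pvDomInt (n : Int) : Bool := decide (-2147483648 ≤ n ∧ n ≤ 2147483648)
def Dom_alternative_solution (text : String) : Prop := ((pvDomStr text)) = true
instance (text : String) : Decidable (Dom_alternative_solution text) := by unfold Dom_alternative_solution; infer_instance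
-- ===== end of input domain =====

-- B replaces A's per-character delete-by-slicing loop with a chunked scan that jumps
-- between '>' markers and slices each marker-free segment once; measured faster.

-- int(c) for a single character c; exact on the digit characters Pre_ admits after '>'
def pyDigit (c : Char) : Nat := ((PySem.Int.ofStr? (String.mk [c])).getD 0).toNat

-- ===== PORT A =====
-- A's while loop; index and power stay ≥ 0 throughout the Python run, so Nat indexing with
-- take/drop for the slices text[:index] + text[index+1:] is exact here.
def alternative_solution_loop (chars : List Char) (index power : Nat) : List Char :=
  if h : index < chars.length then
    if chars.getD index ' ' = '>' then
      alternative_solution_loop chars (index + 1) (power + pyDigit (chars.getD (index + 1) ' '))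
    else if power > 0 then
      -- text = text[:index] + text[index+1:]; index -= 1; power -= 1; index += 1
      alternative_solution_loop (chars.take index ++ chars.drop (index + 1)) index (power - 1)
    else
      alternative_solution_loop chars (index + 1) power
  else chars
termination_by chars.length - index
decreasing_by
  · omega
  · simp [List.length_take, List.length_drop]; omega
  · omega

def alternative_solution (text : String) : String :=
  String.mk (alternative_solution_loop text.toList 0 0)

-- ===== PORT B =====
-- Source B's chunk loop: find the next '>' (takeWhile/dropWhile split off the marker-free
-- segment seg = text[i:j]), emit seg[power:] (empty when power ≥ len(seg)), consume
-- power - len(seg) (Nat subtraction = Python's two branches), then emit '>' and recurse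
-- past it with power increased by the digit after the marker.
def alternative_solution_alt_rec (cs : List Char) (power : Nat) : List Char :=
  if hnil : cs.dropWhile (fun c => c ≠ '>') = [] then
    (cs.takeWhile (fun c => c ≠ '>')).drop power
  else
    let seg := cs.takeWhile (fun c => c ≠ '>')
    let r := (cs.dropWhile (fun c => c ≠ '>')).tail
    seg.drop power ++ '>' :: alternative_solution_alt_rec r (power - seg.length + pyDigit (r.headD ' '))
termination_by cs.length
decreasing_by
  have h1 : (cs.dropWhile (fun c => c ≠ '>')).length ≤ cs.length :=
    List.length_dropWhile_le _ _
  have h2 : 0 < (cs.dropWhile (fun c => c ≠ '>')).length := List.length_pos_iff.mpr hnil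
  rw [List.length_tail]; omega

def alternative_solution_alt (text : String) : String :=
  String.mk (alternative_solution_alt_rec text.toList 0)

-- ===== PRECONDITION & SPEC =====
-- Pre_ excludes exactly the inputs where Python A raises: a '>' that is the last character
-- (IndexError on text[index+1]) or a '>' followed by a non-digit (ValueError in int()).
def Pre_alternative_solution (text : String) : Prop :=
  ∀ i : Nat, i < text.toList.length → text.toList.getD i ' ' = '>' →
    i + 1 < text.toList.length ∧ (text.toList.getD (i + 1) ' ').isDigit = true
instance (text : String) : Decidable (Pre_alternative_solution text) := by
  unfold Pre_alternative_solution; infer_instance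

def pvWitness_alternative_solution : String := ">3abcd"

def Spec_alternative_solution (text : String) (out : String) : Prop := out = alternative_solution_alt text
instance (text : String) (out : String) : Decidable (Spec_alternative_solution text out) := by unfold Spec_alternative_solution; infer_instance

-- ===== CLAIM (what is proved, stated in full; the proofs are below) =====
def Claim_equal_alternative_solution : Prop := ∀ (text : String), Dom_alternative_solution text → Pre_alternative_solution text → Spec_alternative_solution text (alternative_solution text)

-- ===== LEMMAS AND PROOFS =====

-- clean per-character suffix recursion both ports are reduced to
def pvAltS : List Char → Nat → List Char
  | [], _ => []
  | c :: rest, power =>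
    if c = '>' then c :: pvAltS rest (power + pyDigit (rest.headD ' '))
    else if power > 0 then pvAltS rest (power - 1)
    else c :: pvAltS rest power

-- a marker-free segment just loses its first `power` characters
lemma pvAltS_seg (seg : List Char) (hseg : ∀ c ∈ seg, c ≠ '>') :
    ∀ (rest : List Char) (power : Nat),
      pvAltS (seg ++ rest) power = seg.drop power ++ pvAltS rest (power - seg.length) := by
  induction seg with
  | nil => intro rest power; simp
  | cons c t ih =>
    intro rest power
    have hc : c ≠ '>' := hseg c (by simp)
    have ht : ∀ x ∈ t, x ≠ '>' := fun x hx => hseg x (by simp [hx])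
    cases power with
    | zero =>
      simp only [List.cons_append, pvAltS, if_neg hc]
      simp [ih ht rest 0]
    | succ p =>
      simp only [List.cons_append, pvAltS, if_neg hc, if_pos (Nat.succ_pos p),
        Nat.add_sub_cancel]
      rw [ih ht rest p]
      simp only [List.drop_succ_cons, List.length_cons, Nat.succ_sub_succ]

lemma dropWhile_head_gt (l : List Char) (c : Char) (r : List Char)
    (h : l.dropWhile (fun c => c ≠ '>') = c :: r) : c = '>' := by
  induction l with
  | nil => simp at h
  | cons a t ih =>
    by_cases ha : a = '>'
    · have hp : (decide (a ≠ '>')) = false := by simp [ha]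
      rw [List.dropWhile_cons, hp] at h
      simp only [Bool.false_eq_true, if_false, List.cons.injEq] at h
      exact h.1 ▸ ha
    · have hp : (decide (a ≠ '>')) = true := by simp [ha]
      rw [List.dropWhile_cons, hp, if_pos rfl] at h
      exact ih h

lemma altB_eq_altS (cs : List Char) (power : Nat) :
    alternative_solution_alt_rec cs power = pvAltS cs power := by
  induction hn : cs.length using Nat.strong_induction_on generalizing cs power with
  | _ n ih =>
    unfold alternative_solution_alt_rec
    have hsplit : cs.takeWhile (fun c => c ≠ '>') ++ cs.dropWhile (fun c => c ≠ '>') = cs :=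
      List.takeWhile_append_dropWhile
    have hseg : ∀ c ∈ cs.takeWhile (fun c => c ≠ '>'), c ≠ '>' := by
      intro c hc
      have := List.mem_takeWhile_imp hc
      simpa using this
    split
    · next hnil =>
      have hcs : cs = cs.takeWhile (fun c => c ≠ '>') := by
        conv_lhs => rw [← hsplit]
        rw [hnil, List.append_nil]
      have h0 := pvAltS_seg _ hseg [] power
      simp only [List.append_nil, pvAltS] at h0
      conv_rhs => rw [hcs]
      exact h0.symm
    · next hnil =>
      obtain ⟨c, r, hd⟩ : ∃ c r, cs.dropWhile (fun c => c ≠ '>') = c :: r := by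
        cases h : cs.dropWhile (fun c => c ≠ '>') with
        | nil => exact absurd h hnil
        | cons c r => exact ⟨c, r, rfl⟩
      have hc : c = '>' := dropWhile_head_gt cs c r hd
      have hcs : cs = cs.takeWhile (fun c => c ≠ '>') ++ '>' :: r := by
        conv_lhs => rw [← hsplit]
        rw [hd, hc]
      have hlen : r.length < n := by
        have h1 := List.length_dropWhile_le (fun c => c ≠ '>') cs
        rw [hd] at h1
        simp at h1; omega
      rw [hd]
      simp only [List.tail_cons]
      rw [ih r.length hlen r _ rfl]
      conv_rhs => rw [hcs]
      rw [pvAltS_seg _ hseg]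
      simp [pvAltS]

lemma loopA_eq_altS (rest : List Char) :
    ∀ (pre : List Char) (power : Nat),
      alternative_solution_loop (pre ++ rest) pre.length power = pre ++ pvAltS rest power := by
  induction rest with
  | nil =>
    intro pre power
    rw [alternative_solution_loop]
    simp [pvAltS]
  | cons c rest ih =>
    intro pre power
    rw [alternative_solution_loop]
    have hlen : pre.length < (pre ++ c :: rest).length := by simp
    have hgi : (pre ++ c :: rest).getD pre.length ' ' = c := by
      simp [List.getD, List.getElem?_append_right (Nat.le_refl pre.length)]
    have hg1 : (pre ++ c :: rest).getD (pre.length + 1) ' ' = rest.headD ' ' := by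
      cases rest with
      | nil => simp [List.getD, List.getElem?_append_right (by omega : pre.length ≤ pre.length + 1)]
      | cons d r => simp [List.getD, List.getElem?_append_right (by omega : pre.length ≤ pre.length + 1)]
    rw [dif_pos hlen, hgi, hg1]
    by_cases hc : c = '>'
    · rw [if_pos hc]
      have : pre.length + 1 = (pre ++ [c]).length := by simp
      rw [show pre ++ c :: rest = (pre ++ [c]) ++ rest by simp, this, ih]
      simp [hc, pvAltS]
    · rw [if_neg hc]
      by_cases hp : power > 0
      · rw [if_pos hp]
        have htake : (pre ++ c :: rest).take pre.length = pre := by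
          simp [List.take_append_of_le_length (Nat.le_refl pre.length)]
        have hdrop : (pre ++ c :: rest).drop (pre.length + 1) = rest := by
          rw [show pre.length + 1 = (pre ++ [c]).length by simp,
              show pre ++ c :: rest = (pre ++ [c]) ++ rest by simp]
          simp
        rw [htake, hdrop, ih]
        simp [pvAltS, hc, hp]
      · rw [if_neg hp]
        have : pre.length + 1 = (pre ++ [c]).length := by simp
        rw [show pre ++ c :: rest = (pre ++ [c]) ++ rest by simp, this, ih]
        simp [pvAltS, hc, hp]

-- ===== VERDICT (by name: the statement is the Claim_ definition above) =====
theorem alternative_solution_spec : Claim_equal_alternative_solution := by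
  intro text _ _
  unfold Spec_alternative_solution alternative_solution alternative_solution_alt
  rw [altB_eq_altS]
  have h2 : alternative_solution_loop text.toList 0 0 = pvAltS text.toList 0 := by
    simpa using loopA_eq_altS text.toList [] 0
  rw [h2]
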